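-- pv_equiv track=rewrite | github.com/ExeOhe/ExeOheDus | src/logic.py | broke_above_twice
-- ===== SOURCE A (Python) =====
-- def broke_above_twice(history, threshold):
--     count = 0
--     above = False
--     for cap in history:
--         if cap >= threshold:
--             if not above:
--                 count += 1
--                 above = True
--         else:
--             above = False
--     return count >= 2
-- ===== SOURCE B (Python) =====
-- def broke_above_twice(history, threshold):
--     it = iter(history)
--     # A second rising edge exists iff the series reaches threshold, then drops
--     # below it, then reaches it again: three staged short-circuit scans.
--     if not any(cap >= threshold for cap in it):
--         return False
--     if not any(cap < threshold for cap in it):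
--         return False
--     return any(cap >= threshold for cap in it)
-- ===== Notes on version B (the rewrite author's own statement) =====
-- stated objective: alternative
-- what changed: Replaces A's single-pass count/flag state machine with three staged short-circuit scans over one shared iterator: find the first value reaching threshold, then a later value below it, then another reaching it; no run counter or flag is kept.
import Mathlib
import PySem

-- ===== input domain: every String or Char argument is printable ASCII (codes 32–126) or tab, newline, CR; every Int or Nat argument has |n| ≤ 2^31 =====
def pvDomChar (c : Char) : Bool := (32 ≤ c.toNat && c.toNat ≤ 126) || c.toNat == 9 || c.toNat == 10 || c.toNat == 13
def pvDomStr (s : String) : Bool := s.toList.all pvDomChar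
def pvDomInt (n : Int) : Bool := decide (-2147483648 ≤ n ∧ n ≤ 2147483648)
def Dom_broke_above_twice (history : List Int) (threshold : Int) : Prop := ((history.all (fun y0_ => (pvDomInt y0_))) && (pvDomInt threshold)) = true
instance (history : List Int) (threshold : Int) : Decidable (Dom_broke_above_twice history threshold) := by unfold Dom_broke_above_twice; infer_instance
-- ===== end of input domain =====

-- B replaces A's count/flag state machine with three staged short-circuit scans
-- over one shared iterator (above, then below, then above again); alternative
-- decomposition, same cost.

-- ===== PORT A =====
-- for cap in history: count/above state machine (loop body as one step function)
def pvStep (threshold : Int) (st : Int × Bool) (cap : Int) : Int × Bool :=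
  if threshold ≤ cap then
    (if !st.2 then (st.1 + 1, true) else st)
  else
    (st.1, false)

def broke_above_twice (history : List Int) (threshold : Int) : Bool :=
  let s := history.foldl (pvStep threshold) (0, false)
  decide (2 ≤ s.1)

-- ===== PORT B =====
-- `any(cap >= threshold for cap in it)` on a shared iterator: returns the rest
-- of the list after the first hit (the iterator state), or none if exhausted.
def pvScanAbove (threshold : Int) : List Int → Option (List Int)
  | [] => none
  | x :: xs => if threshold ≤ x then some xs else pvScanAbove threshold xs

def pvScanBelow (threshold : Int) : List Int → Option (List Int)
  | [] => none
  | x :: xs => if x < threshold then some xs else pvScanBelow threshold xs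

def broke_above_twice_alt (history : List Int) (threshold : Int) : Bool :=
  match pvScanAbove threshold history with
  | none => false
  | some r1 =>
    match pvScanBelow threshold r1 with
    | none => false
    | some r2 => (pvScanAbove threshold r2).isSome

-- ===== PRECONDITION & SPEC =====
def Spec_broke_above_twice (history : List Int) (threshold : Int) (out : Bool) : Prop := out = broke_above_twice_alt history threshold
instance (history : List Int) (threshold : Int) (out : Bool) : Decidable (Spec_broke_above_twice history threshold out) := by unfold Spec_broke_above_twice; infer_instance

-- ===== CLAIM (what is proved, stated in full; the proofs are below) =====
def Claim_equal_broke_above_twice : Prop := ∀ (history : List Int) (threshold : Int), Dom_broke_above_twice history threshold → Spec_broke_above_twice history threshold (broke_above_twice history threshold)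

-- ===== LEMMAS AND PROOFS =====

-- the counter never decreases along the fold
theorem pvFold_mono (t : Int) (l : List Int) : ∀ (c : Int) (a : Bool),
    c ≤ (l.foldl (pvStep t) (c, a)).1 := by
  induction l with
  | nil => intro c a; simp
  | cons x xs ih =>
    intro c a
    by_cases hx : t ≤ x <;> cases a <;>
      simp only [List.foldl_cons, pvStep, hx, if_true, if_false, Bool.not_true,
        Bool.not_false] <;>
      first
      | exact ih c _
      | exact le_trans (by omega) (ih (c + 1) true)

-- fold from a "not above" state, phrased via the first above-scan
theorem pvFold_false (t : Int) (l : List Int) : ∀ (c : Int),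
    (l.foldl (pvStep t) (c, false)).1
      = match pvScanAbove t l with
        | none => c
        | some r => (r.foldl (pvStep t) (c + 1, true)).1 := by
  induction l with
  | nil => intro c; simp [pvScanAbove]
  | cons x xs ih =>
    intro c
    by_cases hx : t ≤ x
    · simp [List.foldl_cons, pvStep, hx, pvScanAbove]
    · simp [List.foldl_cons, pvStep, hx, pvScanAbove, ih]

-- fold from an "above" state, phrased via the first below-scan
theorem pvFold_true (t : Int) (l : List Int) : ∀ (c : Int),
    (l.foldl (pvStep t) (c, true)).1
      = match pvScanBelow t l with
        | none => c
        | some r => (r.foldl (pvStep t) (c, false)).1 := by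
  induction l with
  | nil => intro c; simp [pvScanBelow]
  | cons x xs ih =>
    intro c
    by_cases hx : t ≤ x
    · have hx' : ¬ x < t := by omega
      have hs : pvStep t (c, true) x = (c, true) := by simp [pvStep, hx]
      rw [List.foldl_cons, hs, ih]
      simp [pvScanBelow, hx']
    · have hx' : x < t := by omega
      simp [List.foldl_cons, pvStep, hx, pvScanBelow, hx']

-- ===== VERDICT (by name: the statement is the Claim_ definition above) =====
theorem broke_above_twice_spec : Claim_equal_broke_above_twice := by
  intro history threshold _
  unfold Spec_broke_above_twice broke_above_twice broke_above_twice_alt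
  simp only [pvFold_false]
  cases h1 : pvScanAbove threshold history with
  | none => simp
  | some r1 =>
    simp only []
    simp only [pvFold_true]
    cases h2 : pvScanBelow threshold r1 with
    | none => simp
    | some r2 =>
      simp only []
      simp only [pvFold_false]
      cases h3 : pvScanAbove threshold r2 with
      | none => simp
      | some r3 =>
        have := pvFold_mono threshold r3 (0 + 1 + 1) true
        simp only [Option.isSome_some, decide_eq_true_eq]
        omega
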